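-- pv_equiv track=rewrite | github.com/ilzxc/thirst | code/saneSampler/werk.py | determineNotes
-- ===== SOURCE A (Python) =====
-- def determineNotes(fileStrings):
--     nonAccidentals = ['E', 'B']
--     withAccidentals = ['A', 'C', 'D', 'F', 'G']
--     octaves = [2, 3, 4, 5, 6, 7, 8, 9]
--     result = []
--     for fileString in fileStrings:
--         for note in nonAccidentals:
--             for octave in octaves:
--                 test = note + str(octave)
--                 if fileString.find(test) is not -1:
--                     result.append(test)
--         for note in withAccidentals:
--             for octave in octaves:
--                 testWithout = note + str(octave)
--                 testWith = note + '#' + str(octave)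
--                 if fileString.find(testWithout) is not -1:
--                     result.append(testWithout)
--                 if fileString.find(testWith) is not -1:
--                     result.append(testWith)
--     return result
-- ===== SOURCE B (Python) =====
-- import re
--
-- _TOKEN = re.compile(r'[A-G]#?[2-9]')
--
-- def determineNotes(fileStrings):
--     candidates = []
--     for note in 'EB':
--         for octave in '23456789':
--             candidates.append(note + octave)
--     for note in 'ACDFG':
--         for octave in '23456789':
--             candidates.append(note + octave)
--             candidates.append(note + '#' + octave)
--     result = []
--     for fileString in fileStrings:
--         found = set(_TOKEN.findall(fileString))
--         for p in candidates:
--             if p in found: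
--                 result.append(p)
--     return result
-- ===== Notes on version B (the rewrite author's own statement) =====
-- stated objective: faster
-- what changed: Instead of running 96 separate substring find() scans over each string, B precomputes the fixed ordered 96-candidate list once, performs a single regex scan re.findall(r'[A-G]#?[2-9]') per string collecting the note tokens into a set, and then emits, in the fixed candidate order, exactly the candidates present in the set.
import Mathlib
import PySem

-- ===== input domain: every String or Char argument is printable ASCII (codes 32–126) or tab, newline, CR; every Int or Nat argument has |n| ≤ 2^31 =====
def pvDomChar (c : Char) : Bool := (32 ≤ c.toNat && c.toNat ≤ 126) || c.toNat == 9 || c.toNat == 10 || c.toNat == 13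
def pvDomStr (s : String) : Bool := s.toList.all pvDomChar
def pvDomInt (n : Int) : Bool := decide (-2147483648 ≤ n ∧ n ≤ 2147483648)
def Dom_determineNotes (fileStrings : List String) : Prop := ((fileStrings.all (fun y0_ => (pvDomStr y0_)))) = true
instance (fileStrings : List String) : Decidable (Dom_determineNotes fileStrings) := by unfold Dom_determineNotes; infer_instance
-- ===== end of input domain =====

-- B replaces A's 96 repeated substring find() scans per string by one regex scan
-- collecting the note tokens into a set, then one ordered filtered emit (objective: faster).

-- ===== PORT A =====
def determineNotes (fileStrings : List String) : List String :=
  let nonAccidentals : List String := ["E", "B"]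
  let withAccidentals : List String := ["A", "C", "D", "F", "G"]
  let octaves : List Int := [2, 3, 4, 5, 6, 7, 8, 9]
  fileStrings.foldl (fun result fileString =>
    let result := nonAccidentals.foldl (fun result note =>
      octaves.foldl (fun result octave =>
        let test := note ++ PySem.Int.toStr octave
        if PySem.Str.find fileString test ≠ -1 then result ++ [test] else result) result) result
    withAccidentals.foldl (fun result note =>
      octaves.foldl (fun result octave =>
        let testWithout := note ++ PySem.Int.toStr octave
        let testWith := note ++ "#" ++ PySem.Int.toStr octave
        let result := if PySem.Str.find fileString testWithout ≠ -1 then result ++ [testWithout] else result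
        if PySem.Str.find fileString testWith ≠ -1 then result ++ [testWith] else result) result) result) []

-- ===== PORT B =====
def altIsNote (c : Char) : Bool := decide ('A' ≤ c) && decide (c ≤ 'G')  -- regex class [A-G]
def altIsOct (c : Char) : Bool := decide ('2' ≤ c) && decide (c ≤ '9')   -- regex class [2-9]

-- Source B's candidate-list construction (note + octave, and note + '#' + octave)
def altCandidates : List String :=
  let c1 := "EB".toList.foldl (fun acc note =>
    "23456789".toList.foldl (fun acc octave => acc ++ [String.ofList [note, octave]]) acc) []
  "ACDFG".toList.foldl (fun acc note =>
    "23456789".toList.foldl (fun acc octave =>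
      (acc ++ [String.ofList [note, octave]]) ++ [String.ofList [note, '#', octave]]) acc) c1

-- hand port of set(re.findall(r'[A-G]#?[2-9]', fileString)) (PySem has no regex): exact —
-- the engine tries each position left to right, greedily matching letter, optional '#', digit;
-- it resumes after a match (non-overlapping) and advances one char on failure; the matches
-- are collected into the set.
def altScan (found : PySem.Set String) : List Char → PySem.Set String
  | [] => found
  | [_] => found
  | [c, d] =>
    if altIsNote c && altIsOct d then PySem.Set.add found (String.ofList [c, d]) else found
  | c :: d :: e :: rest =>
    if altIsNote c = true then
      if altIsOct d = true then altScan (PySem.Set.add found (String.ofList [c, d])) (e :: rest)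
      else if d = '#' then
        (if altIsOct e = true then altScan (PySem.Set.add found (String.ofList [c, '#', e])) rest
         else altScan found (d :: e :: rest))
      else altScan found (d :: e :: rest)
    else altScan found (d :: e :: rest)

def determineNotes_alt (fileStrings : List String) : List String :=
  fileStrings.foldl (fun result fileString =>
    let found := altScan PySem.Set.empty fileString.toList
    altCandidates.foldl (fun result p =>
      if PySem.Set.contains found p then result ++ [p] else result) result) []

-- ===== PRECONDITION & SPEC =====
def Spec_determineNotes (fileStrings : List String) (out : List String) : Prop := out = determineNotes_alt fileStrings
instance (fileStrings : List String) (out : List String) : Decidable (Spec_determineNotes fileStrings out) := by unfold Spec_determineNotes; infer_instance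

-- ===== CLAIM (what is proved, stated in full; the proofs are below) =====
def Claim_equal_determineNotes : Prop := ∀ (fileStrings : List String), Dom_determineNotes fileStrings → Spec_determineNotes fileStrings (determineNotes fileStrings)

-- ===== LEMMAS AND PROOFS =====

def candLit : List String := ["E2", "E3", "E4", "E5", "E6", "E7", "E8", "E9", "B2", "B3", "B4", "B5", "B6", "B7", "B8", "B9", "A2", "A#2", "A3", "A#3", "A4", "A#4", "A5", "A#5", "A6", "A#6", "A7", "A#7", "A8", "A#8", "A9", "A#9", "C2", "C#2", "C3", "C#3", "C4", "C#4", "C5", "C#5", "C6", "C#6", "C7", "C#7", "C8", "C#8", "C9", "C#9", "D2", "D#2", "D3", "D#3", "D4", "D#4", "D5", "D#5", "D6", "D#6", "D7", "D#7", "D8", "D#8", "D9", "D#9", "F2", "F#2", "F3", "F#3", "F4", "F#4", "F5", "F#5", "F6", "F#6", "F7", "F#7", "F8", "F#8", "F9", "F#9", "G2", "G#2", "G3", "G#3", "G4", "G#4", "G5", "G#5", "G6", "G#6", "G7", "G#7", "G8", "G#8", "G9", "G#9"]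

lemma ofList_inj (a b : List Char) : String.ofList a = String.ofList b ↔ a = b := by
  constructor
  · intro h
    have := congrArg String.toList h
    simpa [String.toList_ofList] using this
  · rintro rfl; rfl

lemma note_oct_false (a : Char) (h1 : altIsNote a = true) (h2 : altIsOct a = true) : False := by
  simp only [altIsNote, altIsOct, Bool.and_eq_true, decide_eq_true_eq] at h1 h2
  exact absurd (le_trans h1.1 h2.2) (by decide)

lemma not_infix_of_len {a b : List Char} (h : b.length < a.length) : ¬ a <:+: b :=
  fun hi => absurd hi.length_le (by omega)

lemma infix2_cons (c d x : Char) (t : List Char) :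
    ([c, d] <:+: x :: t) ↔ ((c = x ∧ [d] <+: t) ∨ [c, d] <:+: t) := by
  rw [List.infix_cons_iff, List.cons_prefix_cons]

lemma infix3_cons (c h d x : Char) (t : List Char) :
    ([c, h, d] <:+: x :: t) ↔ ((c = x ∧ [h, d] <+: t) ∨ [c, h, d] <:+: t) := by
  rw [List.infix_cons_iff, List.cons_prefix_cons]

set_option maxHeartbeats 1000000 in
lemma altCandidates_eq : altCandidates = candLit := by decide

lemma prefix_single (d y : Char) (t : List Char) : ([d] <+: y :: t) ↔ d = y := by
  simp [List.cons_prefix_cons]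

lemma scan_mem2 (c d : Char) (hc : altIsNote c = true) (hd : altIsOct d = true) :
    ∀ (n : Nat) (l : List Char), l.length ≤ n → ∀ (found : PySem.Set String),
      ((String.ofList [c, d] ∈ altScan found l) ↔ String.ofList [c, d] ∈ found ∨ [c, d] <:+: l) := by
  intro n
  induction n with
  | zero =>
    intro l hl found
    rcases l with _ | ⟨x, t⟩
    · simp [altScan]
    · simp at hl
  | succ n ih =>
    intro l hl found
    rcases l with _ | ⟨x, _ | ⟨y, _ | ⟨e, t2⟩⟩⟩
    · simp [altScan]
    · have hk := not_infix_of_len (a := [c, d]) (b := [x]) (by simp)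
      simp [altScan, hk]
    · -- two-character string
      have hiff : ([c, d] <:+: [x, y]) ↔ (c = x ∧ d = y) := by
        rw [infix2_cons, infix2_cons, prefix_single]
        have k2 : ¬ ([d] <+: ([] : List Char)) := by simp
        have k3 : ¬ ([c, d] <:+: ([] : List Char)) := by simp
        tauto
      rw [hiff]
      by_cases hAB : (altIsNote x && altIsOct y) = true
      · have hstep : altScan found [x, y] = PySem.Set.add found (String.ofList [x, y]) := by
          simp only [altScan]
          rw [if_pos hAB]
        rw [hstep, PySem.Set.mem_add, ofList_inj]
        simp
      · have hstep : altScan found [x, y] = found := by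
          simp only [altScan]
          rw [if_neg hAB]
        have hk1 : ¬ (c = x ∧ d = y) := by
          rintro ⟨rfl, rfl⟩
          rw [Bool.and_eq_true] at hAB
          exact hAB ⟨hc, hd⟩
        rw [hstep]
        tauto
    · have hlen : t2.length + 3 ≤ n + 1 := by simpa using hl
      by_cases hA : altIsNote x = true
      · by_cases hB : altIsOct y = true
        · have hstep : altScan found (x :: y :: e :: t2)
              = altScan (PySem.Set.add found (String.ofList [x, y])) (e :: t2) := by
            simp [altScan, hA, hB]
          rw [hstep, ih (e :: t2) (by simp; omega) _, PySem.Set.mem_add, ofList_inj,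
            infix2_cons c d x (y :: e :: t2), infix2_cons c d y (e :: t2), prefix_single]
          have hk1 : ¬ (c = y ∧ [d] <+: e :: t2) := fun h => note_oct_false y (h.1 ▸ hc) hB
          have hk2 : ([c, d] = [x, y]) ↔ (c = x ∧ d = y) := by simp
          rw [hk2]
          tauto
        · rw [Bool.not_eq_true] at hB
          by_cases hH : y = '#'
          · subst hH
            have hdk : ¬ (d = '#') := fun h => by
              rw [h] at hd; exact absurd hd (by decide)
            by_cases hE : altIsOct e = true
            · have hstep : altScan found (x :: '#' :: e :: t2)
                  = altScan (PySem.Set.add found (String.ofList [x, '#', e])) t2 := by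
                simp [altScan, hA, hB, hE]
              rw [hstep, ih t2 (by omega) _, PySem.Set.mem_add, ofList_inj,
                infix2_cons c d x ('#' :: e :: t2), infix2_cons c d '#' (e :: t2),
                infix2_cons c d e t2, prefix_single]
              have hk1 : ¬ (c = '#') := fun h => by
                rw [h] at hc; exact absurd hc (by decide)
              have hk2 : ¬ (c = e ∧ [d] <+: t2) := fun h => note_oct_false e (h.1 ▸ hc) hE
              have hk3 : ([c, d] = [x, '#', e]) ↔ False := by simp
              rw [hk3]
              tauto
            · rw [Bool.not_eq_true] at hE
              have hstep : altScan found (x :: '#' :: e :: t2)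
                  = altScan found ('#' :: e :: t2) := by
                simp [altScan, hA, hB, hE]
              rw [hstep, ih ('#' :: e :: t2) (by simp; omega) found,
                infix2_cons c d x ('#' :: e :: t2), prefix_single]
              tauto
          · have hstep : altScan found (x :: y :: e :: t2)
                = altScan found (y :: e :: t2) := by
              simp [altScan, hA, hB, hH]
            rw [hstep, ih (y :: e :: t2) (by simp; omega) found,
              infix2_cons c d x (y :: e :: t2), prefix_single]
            have hk1 : ¬ (c = x ∧ d = y) := by
              rintro ⟨-, rfl⟩
              rw [hd] at hB
              exact absurd hB (by simp)
            tauto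
      · rw [Bool.not_eq_true] at hA
        have hstep : altScan found (x :: y :: e :: t2)
            = altScan found (y :: e :: t2) := by
          simp [altScan, hA]
        rw [hstep, ih (y :: e :: t2) (by simp; omega) found,
          infix2_cons c d x (y :: e :: t2), prefix_single]
        have hk1 : ¬ (c = x) := fun h => by
          rw [h] at hc; rw [hc] at hA; exact absurd hA (by simp)
        tauto

lemma scan_mem3 (c d : Char) (hc : altIsNote c = true) (hd : altIsOct d = true) :
    ∀ (n : Nat) (l : List Char), l.length ≤ n → ∀ (found : PySem.Set String),
      ((String.ofList [c, '#', d] ∈ altScan found l) ↔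
        String.ofList [c, '#', d] ∈ found ∨ [c, '#', d] <:+: l) := by
  intro n
  induction n with
  | zero =>
    intro l hl found
    rcases l with _ | ⟨x, t⟩
    · simp [altScan]
    · simp at hl
  | succ n ih =>
    intro l hl found
    have hkc : ¬ (c = '#') := fun h => by
      rw [h] at hc; exact absurd hc (by decide)
    rcases l with _ | ⟨x, _ | ⟨y, _ | ⟨e, t2⟩⟩⟩
    · simp [altScan]
    · have hk := not_infix_of_len (a := [c, '#', d]) (b := [x]) (by simp)
      simp [altScan, hk]
    · have hk := not_infix_of_len (a := [c, '#', d]) (b := [x, y]) (by simp)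
      by_cases hAB : (altIsNote x && altIsOct y) = true
      · have hstep : altScan found [x, y] = PySem.Set.add found (String.ofList [x, y]) := by
          simp only [altScan]
          rw [if_pos hAB]
        rw [hstep, PySem.Set.mem_add, ofList_inj]
        have hk2 : ([c, '#', d] = [x, y]) ↔ False := by simp
        rw [hk2]
        tauto
      · have hstep : altScan found [x, y] = found := by
          simp only [altScan]
          rw [if_neg hAB]
        rw [hstep]
        tauto
    · have hlen : t2.length + 3 ≤ n + 1 := by simpa using hl
      by_cases hA : altIsNote x = true
      · by_cases hB : altIsOct y = true
        · have hstep : altScan found (x :: y :: e :: t2)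
              = altScan (PySem.Set.add found (String.ofList [x, y])) (e :: t2) := by
            simp [altScan, hA, hB]
          rw [hstep, ih (e :: t2) (by simp; omega) _, PySem.Set.mem_add, ofList_inj,
            infix3_cons c '#' d x (y :: e :: t2), infix3_cons c '#' d y (e :: t2)]
          have hk1 : ¬ (c = y ∧ ['#', d] <+: e :: t2) := fun h => note_oct_false y (h.1 ▸ hc) hB
          have hk2 : ([c, '#', d] = [x, y]) ↔ False := by simp
          have hk3 : ¬ (['#', d] <+: y :: e :: t2) := by
            rintro h
            have h1 := (List.cons_prefix_cons.mp h).1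
            rw [← h1] at hB
            exact absurd hB (by decide)
          rw [hk2]
          tauto
        · rw [Bool.not_eq_true] at hB
          by_cases hH : y = '#'
          · subst hH
            by_cases hE : altIsOct e = true
            · have hstep : altScan found (x :: '#' :: e :: t2)
                  = altScan (PySem.Set.add found (String.ofList [x, '#', e])) t2 := by
                simp [altScan, hA, hB, hE]
              rw [hstep, ih t2 (by omega) _, PySem.Set.mem_add, ofList_inj,
                infix3_cons c '#' d x ('#' :: e :: t2), infix3_cons c '#' d '#' (e :: t2),
                infix3_cons c '#' d e t2]
              have hk2 : ¬ (c = e ∧ ['#', d] <+: t2) := fun h => note_oct_false e (h.1 ▸ hc) hE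
              have hk3 : ([c, '#', d] = [x, '#', e]) ↔ (c = x ∧ d = e) := by simp
              have hk4 : (['#', d] <+: '#' :: e :: t2) ↔ (d = e) := by
                rw [List.cons_prefix_cons, prefix_single]
                simp
              rw [hk3, hk4]
              tauto
            · rw [Bool.not_eq_true] at hE
              have hstep : altScan found (x :: '#' :: e :: t2)
                  = altScan found ('#' :: e :: t2) := by
                simp [altScan, hA, hB, hE]
              rw [hstep, ih ('#' :: e :: t2) (by simp; omega) found,
                infix3_cons c '#' d x ('#' :: e :: t2)]
              have hk4 : ¬ (['#', d] <+: '#' :: e :: t2) := by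
                rintro h
                have h2 := (List.cons_prefix_cons.mp h).2
                rw [prefix_single] at h2
                rw [h2] at hd
                rw [hd] at hE
                exact absurd hE (by simp)
              tauto
          · have hstep : altScan found (x :: y :: e :: t2)
                = altScan found (y :: e :: t2) := by
              simp [altScan, hA, hB, hH]
            rw [hstep, ih (y :: e :: t2) (by simp; omega) found,
              infix3_cons c '#' d x (y :: e :: t2)]
            have hk1 : ¬ (['#', d] <+: y :: e :: t2) := by
              rintro h
              exact hH ((List.cons_prefix_cons.mp h).1).symm
            tauto
      · rw [Bool.not_eq_true] at hA
        have hstep : altScan found (x :: y :: e :: t2)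
            = altScan found (y :: e :: t2) := by
          simp [altScan, hA]
        rw [hstep, ih (y :: e :: t2) (by simp; omega) found,
          infix3_cons c '#' d x (y :: e :: t2)]
        have hk1 : ¬ (c = x) := fun h => by
          rw [h] at hc; rw [hc] at hA; exact absurd hA (by simp)
        tauto

-- a candidate-shaped token: letter+digit or letter+'#'+digit
def goodTok (p : String) : Bool :=
  match p.toList with
  | [c, d] => altIsNote c && altIsOct d
  | [c, h, d] => altIsNote c && (h = '#') && altIsOct d
  | _ => false

lemma goodTok_cond (s p : String) (hg : goodTok p = true) :
    PySem.Set.contains (altScan PySem.Set.empty s.toList) p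
      = decide (PySem.Str.find s p ≠ -1) := by
  rw [Bool.eq_iff_iff, PySem.Set.contains_iff, decide_eq_true_eq,
    PySem.Str.find_ne_neg_one_iff]
  unfold goodTok at hg
  match hl : p.toList with
  | [c, d] =>
    rw [hl] at hg
    simp only [Bool.and_eq_true] at hg
    have hp : p = String.ofList [c, d] := by rw [← hl, String.ofList_toList]
    rw [hp]
    rw [scan_mem2 c d hg.1 hg.2 s.toList.length s.toList le_rfl PySem.Set.empty]
    simp [PySem.Set.empty]
  | [c, h, d] =>
    rw [hl] at hg
    simp only [Bool.and_eq_true, decide_eq_true_eq] at hg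
    obtain ⟨⟨h1, rfl⟩, h3⟩ := hg
    have hp : p = String.ofList [c, '#', d] := by rw [← hl, String.ofList_toList]
    rw [hp]
    rw [scan_mem3 c d h1 h3 s.toList.length s.toList le_rfl PySem.Set.empty]
    simp [PySem.Set.empty]
  | [] => rw [hl] at hg; simp at hg
  | [c] => rw [hl] at hg; simp at hg
  | c :: h :: d :: e :: t => rw [hl] at hg; simp at hg

set_option maxHeartbeats 1000000 in
lemma cond_of_mem (s p : String) (hp : p ∈ candLit) :
    PySem.Set.contains (altScan PySem.Set.empty s.toList) p
      = decide (PySem.Str.find s p ≠ -1) := by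
  apply goodTok_cond
  have h : candLit.all goodTok = true := by decide
  exact List.all_eq_true.mp h p hp

-- loop shapes: a conditional-append fold is a filter
lemma ifLoop (q : String → Bool) (l acc : List String) :
    l.foldl (fun r p => if q p then r ++ [p] else r) acc = acc ++ l.filter q := by
  induction l generalizing acc with
  | nil => simp
  | cons a l ihl =>
    simp only [List.foldl_cons, List.filter_cons]
    by_cases h : q a = true
    · rw [if_pos h, if_pos h, ihl]; simp
    · rw [if_neg h, if_neg h, ihl]

lemma octLoop1 (s note : String) (l : List Int) (acc : List String) :
    l.foldl (fun result octave =>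
        if PySem.Str.find s (note ++ PySem.Int.toStr octave) ≠ -1 then
          result ++ [note ++ PySem.Int.toStr octave] else result) acc
      = acc ++ ((l.map (fun o => note ++ PySem.Int.toStr o)).filter
          (fun p => decide (PySem.Str.find s p ≠ -1))) := by
  induction l generalizing acc with
  | nil => simp
  | cons o l ihl =>
    simp only [List.foldl_cons, List.map_cons, List.filter_cons, decide_eq_true_eq]
    by_cases h : PySem.Str.find s (note ++ PySem.Int.toStr o) ≠ -1
    · rw [if_pos h, if_pos h, ihl]; simp
    · rw [if_neg h, if_neg h, ihl]

lemma octLoop2 (s note : String) (l : List Int) (acc : List String) :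
    l.foldl (fun result octave =>
        if PySem.Str.find s (note ++ "#" ++ PySem.Int.toStr octave) ≠ -1 then
          (if PySem.Str.find s (note ++ PySem.Int.toStr octave) ≠ -1 then
            result ++ [note ++ PySem.Int.toStr octave] else result) ++ [note ++ "#" ++ PySem.Int.toStr octave]
        else
          (if PySem.Str.find s (note ++ PySem.Int.toStr octave) ≠ -1 then
            result ++ [note ++ PySem.Int.toStr octave] else result)) acc
      = acc ++ ((l.flatMap (fun o => [note ++ PySem.Int.toStr o, note ++ "#" ++ PySem.Int.toStr o])).filter
          (fun p => decide (PySem.Str.find s p ≠ -1))) := by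
  induction l generalizing acc with
  | nil => simp
  | cons o l ihl =>
    simp only [List.foldl_cons, List.flatMap_cons, List.filter_append, List.filter_cons,
      List.filter_nil, decide_eq_true_eq]
    rw [ihl]
    split_ifs <;> simp

lemma flatMap_filter {α : Type} (l : List α) (h : α → List String) (f : String → Bool) :
    l.flatMap (fun n => (h n).filter f) = (l.flatMap h).filter f := by
  induction l with
  | nil => simp
  | cons a l ihl => simp [List.flatMap_cons, List.filter_append, ihl]

set_option maxHeartbeats 1000000 in
lemma cand_flatten :
    ((["E", "B"] : List String).flatMap (fun note =>
        ([2, 3, 4, 5, 6, 7, 8, 9] : List Int).map (fun o => note ++ PySem.Int.toStr o)))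
      ++ ((["A", "C", "D", "F", "G"] : List String).flatMap (fun note =>
        ([2, 3, 4, 5, 6, 7, 8, 9] : List Int).flatMap (fun o =>
          [note ++ PySem.Int.toStr o, note ++ "#" ++ PySem.Int.toStr o])))
      = candLit := by decide

lemma stepA_eq (s : String) (acc : List String) :
    ((["A", "C", "D", "F", "G"] : List String).foldl (fun result note =>
        ([2, 3, 4, 5, 6, 7, 8, 9] : List Int).foldl (fun result octave =>
          if PySem.Str.find s (note ++ "#" ++ PySem.Int.toStr octave) ≠ -1 then
            (if PySem.Str.find s (note ++ PySem.Int.toStr octave) ≠ -1 then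
              result ++ [note ++ PySem.Int.toStr octave] else result) ++ [note ++ "#" ++ PySem.Int.toStr octave]
          else
            (if PySem.Str.find s (note ++ PySem.Int.toStr octave) ≠ -1 then
              result ++ [note ++ PySem.Int.toStr octave] else result)) result)
      ((["E", "B"] : List String).foldl (fun result note =>
        ([2, 3, 4, 5, 6, 7, 8, 9] : List Int).foldl (fun result octave =>
          if PySem.Str.find s (note ++ PySem.Int.toStr octave) ≠ -1 then
            result ++ [note ++ PySem.Int.toStr octave] else result) result) acc))
    = acc ++ candLit.filter (fun p => decide (PySem.Str.find s p ≠ -1)) := by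
  have h1 : (["E", "B"] : List String).foldl (fun result note =>
        ([2, 3, 4, 5, 6, 7, 8, 9] : List Int).foldl (fun result octave =>
          if PySem.Str.find s (note ++ PySem.Int.toStr octave) ≠ -1 then
            result ++ [note ++ PySem.Int.toStr octave] else result) result) acc
      = acc ++ ((["E", "B"] : List String).flatMap (fun note =>
          ([2, 3, 4, 5, 6, 7, 8, 9] : List Int).map (fun o => note ++ PySem.Int.toStr o))).filter
            (fun p => decide (PySem.Str.find s p ≠ -1)) := by
    rw [PySem.List.foldl_congr_mem _ _
      (fun (r : List String) (note : String) => r ++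
        ((([2, 3, 4, 5, 6, 7, 8, 9] : List Int).map (fun o => note ++ PySem.Int.toStr o)).filter
          (fun p => decide (PySem.Str.find s p ≠ -1)))) acc
      (fun a note _ => octLoop1 s note _ a)]
    rw [PySem.List.foldl_append_eq_flatMap, flatMap_filter]
  have h2 : ∀ (a : List String), (["A", "C", "D", "F", "G"] : List String).foldl (fun result note =>
        ([2, 3, 4, 5, 6, 7, 8, 9] : List Int).foldl (fun result octave =>
          if PySem.Str.find s (note ++ "#" ++ PySem.Int.toStr octave) ≠ -1 then
            (if PySem.Str.find s (note ++ PySem.Int.toStr octave) ≠ -1 then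
              result ++ [note ++ PySem.Int.toStr octave] else result) ++ [note ++ "#" ++ PySem.Int.toStr octave]
          else
            (if PySem.Str.find s (note ++ PySem.Int.toStr octave) ≠ -1 then
              result ++ [note ++ PySem.Int.toStr octave] else result)) result) a
      = a ++ ((["A", "C", "D", "F", "G"] : List String).flatMap (fun note =>
          ([2, 3, 4, 5, 6, 7, 8, 9] : List Int).flatMap (fun o =>
            [note ++ PySem.Int.toStr o, note ++ "#" ++ PySem.Int.toStr o]))).filter
            (fun p => decide (PySem.Str.find s p ≠ -1)) := by
    intro a
    rw [PySem.List.foldl_congr_mem _ _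
      (fun (r : List String) (note : String) => r ++
        ((([2, 3, 4, 5, 6, 7, 8, 9] : List Int).flatMap (fun o =>
            [note ++ PySem.Int.toStr o, note ++ "#" ++ PySem.Int.toStr o])).filter
          (fun p => decide (PySem.Str.find s p ≠ -1)))) a
      (fun r note _ => octLoop2 s note _ r)]
    rw [PySem.List.foldl_append_eq_flatMap, flatMap_filter]
  rw [h1, h2, List.append_assoc, ← List.filter_append, cand_flatten]

lemma stepB_eq (s : String) (acc : List String) :
    (altCandidates.foldl (fun result p =>
        if PySem.Set.contains (altScan PySem.Set.empty s.toList) p then result ++ [p] else result) acc)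
    = acc ++ candLit.filter (fun p =>
        PySem.Set.contains (altScan PySem.Set.empty s.toList) p) := by
  rw [altCandidates_eq, ifLoop]

-- ===== VERDICT (by name: the statement is the Claim_ definition above) =====
theorem determineNotes_spec : Claim_equal_determineNotes := by
  intro fileStrings _
  unfold Spec_determineNotes determineNotes determineNotes_alt
  dsimp only
  apply PySem.List.foldl_congr_mem
  intro acc s _
  dsimp only
  rw [stepA_eq s acc, stepB_eq s acc]
  congr 1
  exact List.filter_congr (fun p hp => (cond_of_mem s p hp).symm)
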